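-- pv_equiv track=rewrite | github.com/MelissaMesesan/UBB---Computer-Sciene-projects-info-romana-2021-2024- | Semestrul 4/AI/lab1/pb6.py | majorant_elem
-- ===== SOURCE A (Python) =====
-- def majorant_elem(length, lst):
--     """
--     Total complexity: O(n), where n is number of elements in arr
--     :param length: length of lst = n
--     :param lst: list of int
--     :return: the keys from the result
--     """
--     count = {}  # the dict where the key is the number and value is the count, complexity O(n)
--     arr = []  # the list where i put the results
--     # cont how many times appears every number, complexity O(n)
--     for word in lst:
--         count[word] = count.get(word, 0) + 1
--     # check what number appears length//2 times and add it to the result, complexity O(m),where m = nmb of unique nmb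
--     for key in count.keys():
--         if count[key] == length // 2:
--             arr.append(key)
--     return arr
-- ===== SOURCE B (Python) =====
-- def majorant_elem(length, lst):
--     half = length // 2
--     res = []
--     rem = lst
--     while rem:
--         x = rem[0]
--         rest = [y for y in rem if y != x]
--         if len(rem) - len(rest) == half:
--             res.append(x)
--         rem = rest
--     return res
-- ===== Notes on version B (the rewrite author's own statement) =====
-- stated objective: alternative
-- what changed: Replaces the frequency dict with partition-elimination: repeatedly take the first remaining element, split off all its occurrences in one list-comprehension pass, obtain its count as the length difference, and recurse/loop on the shrunken list - no dict, no counting table.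
import Mathlib
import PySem

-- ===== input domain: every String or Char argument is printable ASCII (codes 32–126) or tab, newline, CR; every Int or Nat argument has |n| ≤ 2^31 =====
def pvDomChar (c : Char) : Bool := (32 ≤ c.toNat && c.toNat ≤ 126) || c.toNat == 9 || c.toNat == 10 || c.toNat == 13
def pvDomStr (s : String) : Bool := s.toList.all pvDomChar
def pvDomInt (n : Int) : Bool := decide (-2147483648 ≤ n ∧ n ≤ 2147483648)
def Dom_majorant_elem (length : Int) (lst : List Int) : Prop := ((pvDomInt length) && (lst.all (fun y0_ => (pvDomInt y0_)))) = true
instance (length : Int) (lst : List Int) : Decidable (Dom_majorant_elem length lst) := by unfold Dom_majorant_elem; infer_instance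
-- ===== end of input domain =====

-- B replaces A's frequency dict with partition-elimination: repeatedly split off all occurrences of the first remaining element and use the length difference as its count (objective: alternative).


-- ===== PORT A =====
-- count[key] is ported as getD key 0: every iterated key is present in the dict, so Python's lookup never raises.
def majorant_elem (length : Int) (lst : List Int) : List Int :=
  let count := lst.foldl (fun d x => d.insert x (d.getD x 0 + 1)) PySem.Dict.empty
  count.keys.foldl
    (fun arr key => if count.getD key 0 = PySem.Int.floordiv length 2 then arr ++ [key] else arr) []

-- ===== PORT B =====
-- the while loop of Source B: state (res, rem); each step partitions rem on its first element
def pvGoB (half : Int) (res : List Int) : List Int → List Int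
  | [] => res
  | x :: r =>
      let rest := (x :: r).filter (fun y => decide (y ≠ x))
      pvGoB half
        (if ((x :: r).length : Int) - (rest.length : Int) = half then res ++ [x] else res)
        rest
  termination_by rem => rem.length
  decreasing_by
    have h : ((x :: r).filter (fun y => decide (y ≠ x))).length ≤ r.length := by
      rw [List.filter_cons]
      simp only [ne_eq, not_true_eq_false, decide_false]
      exact List.length_filter_le _ _
    simpa using Nat.lt_succ_of_le h

def majorant_elem_alt (length : Int) (lst : List Int) : List Int :=
  pvGoB (PySem.Int.floordiv length 2) [] lst

-- ===== PRECONDITION & SPEC =====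
def Spec_majorant_elem (length : Int) (lst : List Int) (out : List Int) : Prop := out = majorant_elem_alt length lst
instance (length : Int) (lst : List Int) (out : List Int) : Decidable (Spec_majorant_elem length lst out) := by unfold Spec_majorant_elem; infer_instance

-- ===== CLAIM (what is proved, stated in full; the proofs are below) =====
def Claim_equal_majorant_elem : Prop := ∀ (length : Int) (lst : List Int), Dom_majorant_elem length lst → Spec_majorant_elem length lst (majorant_elem length lst)

-- ===== LEMMAS AND PROOFS =====

-- first occurrences of l not already in s, in order (proof helper)
def pvDdf (s : PySem.Set Int) : List Int → List Int
  | [] => []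
  | x :: l => if PySem.Set.contains s x then pvDdf s l else x :: pvDdf (PySem.Set.add s x) l

theorem pvUpdate_eq (l : List Int) : ∀ (s : PySem.Set Int), PySem.Set.update s l = s ++ pvDdf s l := by
  induction l with
  | nil => intro s; simp [PySem.Set.update_nil, pvDdf]
  | cons x l ih =>
    intro s
    rw [PySem.Set.update_cons]
    by_cases hm : x ∈ s
    · have hc := (PySem.Set.contains_iff s x).2 hm
      rw [PySem.Set.add_of_mem hm, ih s]
      simp only [pvDdf, if_pos hc]
    · have hc : ¬ PySem.Set.contains s x = true := fun h => hm ((PySem.Set.contains_iff s x).1 h)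
      rw [ih (PySem.Set.add s x)]
      simp only [pvDdf, if_neg hc]
      rw [PySem.Set.add_of_not_mem hm]
      simp

theorem pvDdf_empty (l : List Int) : pvDdf PySem.Set.empty l = PySem.Set.ofList l := by
  have := pvUpdate_eq l PySem.Set.empty
  rw [PySem.Set.update_empty] at this
  simpa using this.symm

-- pvDdf only looks at membership of s
theorem pvDdf_congr : ∀ (l : List Int) (s t : PySem.Set Int),
    (∀ y, y ∈ s ↔ y ∈ t) → pvDdf s l = pvDdf t l := by
  intro l
  induction l with
  | nil => intro s t h; simp [pvDdf]
  | cons x l ih =>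
    intro s t h
    simp only [pvDdf]
    by_cases hx : x ∈ s
    · rw [if_pos ((PySem.Set.contains_iff s x).2 hx),
        if_pos ((PySem.Set.contains_iff t x).2 ((h x).1 hx))]
      exact ih s t h
    · have hxt : x ∉ t := fun hh => hx ((h x).2 hh)
      rw [if_neg (fun hc => hx ((PySem.Set.contains_iff s x).1 hc)),
        if_neg (fun hc => hxt ((PySem.Set.contains_iff t x).1 hc))]
      have := ih (PySem.Set.add s x) (PySem.Set.add t x) (fun y => by
        rw [PySem.Set.mem_add, PySem.Set.mem_add, h y])
      rw [this]

-- an element absent from l may be dropped from the seen set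
theorem pvDdf_add_not_mem : ∀ (l : List Int) (s : PySem.Set Int) (x : Int),
    x ∉ l → pvDdf (PySem.Set.add s x) l = pvDdf s l := by
  intro l
  induction l with
  | nil => intro s x _; simp [pvDdf]
  | cons y l ih =>
    intro s x hx
    have hyx : y ≠ x := fun h => hx (h ▸ List.mem_cons_self)
    have hxl : x ∉ l := fun h => hx (List.mem_cons_of_mem _ h)
    simp only [pvDdf]
    by_cases hy : y ∈ s
    · rw [if_pos ((PySem.Set.contains_iff _ y).2 ((PySem.Set.mem_add s x y).2 (Or.inl hy))),
        if_pos ((PySem.Set.contains_iff s y).2 hy)]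
      exact ih s x hxl
    · have hyn : y ∉ PySem.Set.add s x := fun h => by
        rcases (PySem.Set.mem_add s x y).1 h with h' | h'
        · exact hy h'
        · exact hyx h'
      rw [if_neg (fun hc => hyn ((PySem.Set.contains_iff _ y).1 hc)),
        if_neg (fun hc => hy ((PySem.Set.contains_iff s y).1 hc))]
      congr 1
      have hcomm : pvDdf (PySem.Set.add (PySem.Set.add s x) y) l
          = pvDdf (PySem.Set.add (PySem.Set.add s y) x) l := by
        apply pvDdf_congr
        intro z
        simp only [PySem.Set.mem_add]
        tauto
      rw [hcomm, ih (PySem.Set.add s y) x hxl]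

-- elements already seen may be filtered out of l
theorem pvDdf_filter : ∀ (l : List Int) (s : PySem.Set Int) (x : Int),
    x ∈ s → pvDdf s l = pvDdf s (l.filter (fun y => decide (y ≠ x))) := by
  intro l
  induction l with
  | nil => intro s x _; simp
  | cons y l ih =>
    intro s x hx
    rw [List.filter_cons]
    by_cases hyx : y = x
    · subst hyx
      simp only [ne_eq, not_true_eq_false, decide_false, if_neg Bool.false_ne_true]
      simp only [pvDdf, if_pos ((PySem.Set.contains_iff s y).2 hx)]
      exact ih s y hx
    · simp only [ne_eq, hyx, not_false_eq_true, decide_true, if_pos]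
      simp only [pvDdf]
      by_cases hy : y ∈ s
      · rw [if_pos ((PySem.Set.contains_iff s y).2 hy), if_pos ((PySem.Set.contains_iff s y).2 hy)]
        exact ih s x hx
      · rw [if_neg (fun hc => hy ((PySem.Set.contains_iff s y).1 hc)),
          if_neg (fun hc => hy ((PySem.Set.contains_iff s y).1 hc))]
        congr 1
        exact ih (PySem.Set.add s y) x ((PySem.Set.mem_add s y x).2 (Or.inl hx))

-- characterisation of the B loop
theorem pvGoB_eq (half : Int) : ∀ (n : Nat) (rem : List Int), rem.length ≤ n → ∀ (res : List Int),
    pvGoB half res rem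
      = res ++ (PySem.Set.ofList rem).filter (fun y => decide ((rem.count y : Int) = half)) := by
  intro n
  induction n with
  | zero =>
    intro rem h res
    have : rem = [] := List.eq_nil_of_length_eq_zero (Nat.le_zero.1 h)
    subst this
    simp [pvGoB]
  | succ n ih =>
    intro rem h res
    cases rem with
    | nil => simp [pvGoB]
    | cons x r =>
      rw [pvGoB]
      have hrest : (x :: r).filter (fun y => decide (y ≠ x)) = r.filter (fun y => decide (y ≠ x)) := by
        rw [List.filter_cons]
        simp
      have hlen : (r.filter (fun y => decide (y ≠ x))).length ≤ n := by
        have := List.length_filter_le (fun y => decide (y ≠ x)) r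
        simp only [List.length_cons] at h
        omega
      -- count of x as a length difference
      have hcnt : ((x :: r).length : Int) - (((x :: r).filter (fun y => decide (y ≠ x))).length : Int)
          = ((x :: r).count x : Int) := by
        have h1 := List.length_eq_countP_add_countP (l := (x :: r)) (fun y => decide (y ≠ x))
        have h2 : (x :: r).count x = (x :: r).countP (fun a => decide (¬ decide (a ≠ x) = true)) := by
          rw [List.count]
          apply List.countP_congr
          intro y _
          by_cases hy : y = x <;> simp [hy]
        rw [← List.countP_eq_length_filter]
        simp only [decide_not] at h1 h2 ⊢
        omega
      rw [hcnt, hrest]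
      rw [ih (r.filter (fun y => decide (y ≠ x))) hlen]
      -- ofList of the cons splits off x and the filtered tail
      have hof : PySem.Set.ofList (x :: r)
          = x :: PySem.Set.ofList (r.filter (fun y => decide (y ≠ x))) := by
        rw [← pvDdf_empty, ← pvDdf_empty]
        show pvDdf [] (x :: r) = _
        rw [pvDdf]
        have hc : ¬ PySem.Set.contains ([] : PySem.Set Int) x = true := by simp
        rw [if_neg hc]
        congr 1
        have hxmem : x ∈ PySem.Set.add ([] : PySem.Set Int) x :=
          (PySem.Set.mem_add _ x x).2 (Or.inr rfl)
        rw [pvDdf_filter r (PySem.Set.add ([] : PySem.Set Int) x) x hxmem]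
        exact pvDdf_add_not_mem _ ([] : PySem.Set Int) x (by simp)
      rw [hof, List.filter_cons]
      -- counts in the filtered remainder agree with counts in x :: r for its members
      have hflt : (PySem.Set.ofList (r.filter (fun y => decide (y ≠ x)))).filter
            (fun y => decide (((r.filter (fun y => decide (y ≠ x))).count y : Int) = half))
          = (PySem.Set.ofList (r.filter (fun y => decide (y ≠ x)))).filter
            (fun y => decide (((x :: r).count y : Int) = half)) := by
        apply List.filter_congr
        intro y hy
        have hyf : y ∈ r.filter (fun y => decide (y ≠ x)) := (PySem.Set.mem_ofList _ _).1 hy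
        have hyx : (decide (y ≠ x) : Bool) = true := (List.mem_filter.1 hyf).2
        have hcf := List.count_filter (p := fun y => decide (y ≠ x)) (a := y) (l := r) hyx
        have hxy : ¬ x = y := fun h => by subst h; simp at hyx
        rw [hcf, List.count_cons]
        simp [hxy]
      rw [hflt]
      by_cases hb : ((r.count x : Int) + 1 = half) <;> simp [hb]

-- characterisation of A
theorem pvA_char (length : Int) (lst : List Int) :
    majorant_elem length lst
      = (PySem.Set.ofList lst).filter
          (fun key => decide ((lst.count key : Int) = PySem.Int.floordiv length 2)) := by
  unfold majorant_elem
  rw [PySem.Dict.foldl_insert_getD_add_one_eq_counter]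
  simp only [PySem.Dict.getD_counter, PySem.Dict.keys_counter]
  have hfun : (fun (arr : List Int) (key : Int) =>
      if (lst.count key : Int) = PySem.Int.floordiv length 2 then arr ++ [key] else arr)
    = fun (arr : List Int) (key : Int) =>
      if (fun k : Int => decide ((lst.count k : Int) = PySem.Int.floordiv length 2)) key = true
      then arr ++ [(id key : Int)] else arr := by
    funext arr key; simp
  rw [hfun, PySem.List.foldl_append_if]
  simp

theorem majorant_elem_eq (length : Int) (lst : List Int) :
    majorant_elem length lst = majorant_elem_alt length lst := by
  rw [pvA_char]
  unfold majorant_elem_alt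
  rw [pvGoB_eq (PySem.Int.floordiv length 2) lst.length lst le_rfl []]
  simp

-- ===== VERDICT (by name: the statement is the Claim_ definition above) =====
theorem majorant_elem_spec : Claim_equal_majorant_elem := by
  intro length lst _
  unfold Spec_majorant_elem
  exact majorant_elem_eq length lst
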